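-- pv_equiv track=rewrite | github.com/Ayush-Tiwari1/DSA | Days.25/4.Biconnected-Graph.py | BiconnectedGraph
-- ===== SOURCE A (Python) =====
-- def dfs(u,time,disc,low,parent,AP,adj):
--     disc[u]=low[u]=time[0]
--     time[0]+=1
--     count=0
--     for v in adj[u]:
--         if disc[v]==-1:
--             count+=1
--             parent[v]=u
--             dfs(v,time,disc,low,parent,AP,adj)
--             low[u]=min(low[u],low[v])
--             if parent[u]==-1 and count>1:
--                 AP[u]=True
--             if parent[u]!=-1 and low[v]>=disc[u]:
--                 AP[u]=True
--         elif parent[u]!=v: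
--             low[u]=min(low[u],disc[v])
--
-- def BiconnectedGraph(V,adj):
--     disc=[-1 for i in range(V)]
--     low=[-1 for i in range(V)]
--     parent=[-1 for i in range(V)]
--     AP=[False for i in range(V)]
--     time=[0]
--     dfs(0,time,disc,low,parent,AP,adj)
--     for i in range(V):
--         if disc[i]==-1:
--             return False
--     for i in range(V):
--         if AP[i]==True:
--             return False
--     return True
-- ===== SOURCE B (Python) =====
-- def BiconnectedGraph(V, adj):
--     # Iterative DFS with an explicit frame stack (u, child-count, next-neighbour index)
--     # instead of A's recursion; same disc/low/time assignment order and the same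
--     # articulation-point tests, applied when a child frame is popped.
--     disc = [-1] * V
--     low = [-1] * V
--     parent = [-1] * V
--     ap = [False] * V
--     time = 0
--     disc[0] = low[0] = time
--     time += 1
--     stack = [[0, 0, 0]]          # [node, child count, index into adj[node]]
--     while stack:
--         frame = stack[-1]
--         u, count, i = frame
--         if i < len(adj[u]):
--             frame[2] = i + 1
--             v = adj[u][i]
--             if disc[v] == -1:
--                 frame[1] = count + 1
--                 parent[v] = u
--                 disc[v] = low[v] = time
--                 time += 1
--                 stack.append([v, 0, 0])
--             elif parent[u] != v:
--                 low[u] = min(low[u], disc[v])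
--         else:
--             stack.pop()
--             if stack:
--                 p, cp, _ = stack[-1]
--                 low[p] = min(low[p], low[u])
--                 if parent[p] == -1 and cp > 1:
--                     ap[p] = True
--                 if parent[p] != -1 and low[u] >= disc[p]:
--                     ap[p] = True
--     return -1 not in disc and True not in ap
-- ===== Notes on version B (the rewrite author's own statement) =====
-- stated objective: alternative
-- what changed: replaces the recursive articulation-point DFS with an iterative DFS over an explicit stack of (node, child-count, neighbour-index) frames, doing the low-link update and both articulation-point tests at the moment a child frame is popped
-- outside the precondition, e.g. on BiconnectedGraph(2, [[1, -1], [0], [9]]): A returns True, B returns True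
import Mathlib
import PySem

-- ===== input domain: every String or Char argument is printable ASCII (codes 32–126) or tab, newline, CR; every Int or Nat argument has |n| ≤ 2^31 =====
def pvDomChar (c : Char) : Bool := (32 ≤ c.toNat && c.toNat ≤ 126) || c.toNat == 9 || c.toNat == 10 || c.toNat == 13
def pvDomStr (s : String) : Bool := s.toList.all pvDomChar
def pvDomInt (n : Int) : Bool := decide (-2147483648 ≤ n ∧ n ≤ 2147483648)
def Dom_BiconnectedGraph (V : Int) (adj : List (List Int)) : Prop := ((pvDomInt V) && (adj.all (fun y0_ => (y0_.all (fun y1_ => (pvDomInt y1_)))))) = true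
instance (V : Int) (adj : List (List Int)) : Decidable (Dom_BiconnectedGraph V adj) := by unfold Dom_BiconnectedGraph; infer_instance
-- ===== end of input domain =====

-- B replaces A's recursive DFS by an iterative DFS over an explicit frame stack (same
-- disc/low/time assignments, articulation-point tests applied when a child frame is popped);
-- an alternative decomposition, no speed claim.

-- ===== PORT A =====
-- shared tiny state helpers (both Pythons perform these identical primitive reads/writes;
-- exact for indices in [-len, len) — Python's wraparound rule; Pre_ keeps indexing there)
def stGet (xs : List Int) (i : Int) : Int := (PySem.List.pyGet? xs i).getD 0
def stSet (xs : List Int) (i : Int) (x : Int) : List Int :=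
  if 0 ≤ i then xs.set i.toNat x else xs.set (i + xs.length).toNat x
def stSetB (xs : List Bool) (i : Int) (x : Bool) : List Bool :=
  if 0 ≤ i then xs.set i.toNat x else xs.set (i + xs.length).toNat x

structure PvSt where
  time : Int
  disc : List Int
  low : List Int
  par : List Int
  ap : List Bool
deriving DecidableEq, Repr

def adjOf (adj : List (List Int)) (u : Int) : List Int := (PySem.List.pyGet? adj u).getD []

-- disc[v]=low[v]=time[0]; time[0]+=1   (performed at the top of A's dfs, at push time in B)
def visitSt (v : Int) (st : PvSt) : PvSt :=
  { st with disc := stSet st.disc v st.time, low := stSet st.low v st.time, time := st.time + 1 }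

-- low[p]=min(low[p],low[v]); the two AP tests with child count cp
-- (A runs these lines right after dfs(v) returns; B runs them when frame v is popped)
def popEffLow (p v : Int) (st : PvSt) : PvSt :=
  { st with low := stSet st.low p (min (stGet st.low p) (stGet st.low v)) }
def popEffRoot (p : Int) (cp : Nat) (st : PvSt) : PvSt :=
  if stGet st.par p = -1 ∧ 1 < cp then { st with ap := stSetB st.ap p true } else st
def popEffNonroot (p v : Int) (st : PvSt) : PvSt :=
  if stGet st.par p ≠ -1 ∧ stGet st.disc p ≤ stGet st.low v then { st with ap := stSetB st.ap p true } else st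
def popEff (p : Int) (cp : Nat) (v : Int) (st : PvSt) : PvSt :=
  popEffNonroot p v (popEffRoot p cp (popEffLow p v st))

-- A's dfs: recursion with fuel (fuel only makes the recursion total; with the initial
-- fuel V.toNat+1 it never runs out on inputs Pre_ admits, since each level marks a node)
mutual
def dfsA (fuel : Nat) (u : Int) (adj : List (List Int)) (st : PvSt) : PvSt :=
  match fuel with
  | 0 => st
  | f + 1 => loopA f u adj (adjOf adj u) 0 (visitSt u st)
  termination_by (fuel, 0)

def loopA (f : Nat) (u : Int) (adj : List (List Int)) (ns : List Int) (count : Nat) (st : PvSt) : PvSt :=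
  match ns with
  | [] => st
  | v :: ns' =>
    if stGet st.disc v = -1 then
      loopA f u adj ns' (count + 1) (popEff u (count + 1) v (dfsA f v adj { st with par := stSet st.par v u }))
    else if stGet st.par u ≠ v then
      loopA f u adj ns' count { st with low := stSet st.low u (min (stGet st.low u) (stGet st.disc v)) }
    else
      loopA f u adj ns' count st
  termination_by (f, ns.length + 1)
end

def BiconnectedGraph (V : Int) (adj : List (List Int)) : Bool :=
  let n := V.toNat
  let st0 : PvSt := ⟨0, List.replicate n (-1), List.replicate n (-1), List.replicate n (-1), List.replicate n false⟩
  let st := dfsA (n + 1) 0 adj st0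
  if st.disc.any (fun d => d == -1) then false
  else if st.ap.any (fun b => b) then false
  else true

-- ===== PORT B =====
-- iterative DFS: a stack of frames (node, child count, remaining neighbours);
-- fuel only makes the loop total (one unit per loop iteration; the chosen budget
-- is proved sufficient on inputs Pre_ admits)
def runB (fuel : Nat) (adj : List (List Int)) (stack : List (Int × Nat × List Int)) (st : PvSt) : PvSt :=
  match fuel with
  | 0 => st
  | f + 1 =>
    match stack with
    | [] => st
    | (u, count, ns) :: rest =>
      match ns with
      | [] =>
        match rest with
        | [] => runB f adj [] st
        | (p, cp, nsp) :: r => runB f adj ((p, cp, nsp) :: r) (popEff p cp u st)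
      | v :: ns' =>
        if stGet st.disc v = -1 then
          runB f adj ((v, 0, adjOf adj v) :: (u, count + 1, ns') :: rest) (visitSt v { st with par := stSet st.par v u })
        else if stGet st.par u ≠ v then
          runB f adj ((u, count, ns') :: rest) { st with low := stSet st.low u (min (stGet st.low u) (stGet st.disc v)) }
        else
          runB f adj ((u, count, ns') :: rest) st

def maxAdjLen (adj : List (List Int)) : Nat := adj.foldr (fun l m => max l.length m) 0

def BiconnectedGraph_alt (V : Int) (adj : List (List Int)) : Bool :=
  let n := V.toNat
  let st0 : PvSt := ⟨0, List.replicate n (-1), List.replicate n (-1), List.replicate n (-1), List.replicate n false⟩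
  let st := runB (n * (maxAdjLen adj + 1) + 1) adj [(0, 0, adjOf adj 0)] (visitSt 0 st0)
  decide ((-1) ∉ st.disc ∧ true ∉ st.ap)

-- ===== PRECONDITION & SPEC =====
-- nIdx len i = the list slot Python's xs[i] addresses (negative i counts from the end)
def nIdx (len : Nat) (i : Int) : Nat := (if i < 0 then i + len else i).toNat

-- worklist closure over the INPUT graph: starting from row 0, follow every neighbour to
-- its row (by Python's index rule) and demand each touched row exists and has neighbours
-- in [-V, V) (and ≥ -len(adj)); none = some touched row is missing or out of bounds.
-- This is a shape condition on the input graph only (no DFS state is simulated).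
def clo (adj : List (List Int)) (V : Int) : Nat → List Nat → List Nat → Option (List Nat)
  | _, C, [] => some C
  | 0, _, _ :: _ => none
  | f + 1, C, j :: rest =>
    if j < adj.length ∧ ∀ x ∈ adj.getD j [], (-V ≤ x ∧ x < V) ∧ -(adj.length : Int) ≤ x then
      clo adj V f (C ++ (((adj.getD j []).map (fun x => nIdx adj.length x)).dedup).filter (fun k => decide (k ∉ C)))
                  (rest ++ (((adj.getD j []).map (fun x => nIdx adj.length x)).dedup).filter (fun k => decide (k ∉ C)))
    else none

-- Pre_ = V ≥ 1 and every adjacency row reachable from vertex 0 (following raw neighbour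
-- values by Python's index semantics, with no visited-pruning) exists and has neighbours
-- in [-V, V): exactly there A is guaranteed to return. Excluded inputs on which A still
-- returns are the rare ones whose out-of-shape rows are only protected by the traversal's
-- visited-slot pruning (first-encounter DFS state, not input shape); A and B agree there.
def Pre_BiconnectedGraph (V : Int) (adj : List (List Int)) : Prop :=
  1 ≤ V ∧ (clo adj V (adj.length + 2) [0] [0]).isSome = true
instance (V : Int) (adj : List (List Int)) : Decidable (Pre_BiconnectedGraph V adj) := by
  unfold Pre_BiconnectedGraph; infer_instance

def pvWitness_BiconnectedGraph : Int × List (List Int) := (3, [[1, 2], [0, 2], [0, 1]])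

def Spec_BiconnectedGraph (V : Int) (adj : List (List Int)) (out : Bool) : Prop := out = BiconnectedGraph_alt V adj
instance (V : Int) (adj : List (List Int)) (out : Bool) : Decidable (Spec_BiconnectedGraph V adj out) := by unfold Spec_BiconnectedGraph; infer_instance

-- ===== CLAIM (what is proved, stated in full; the proofs are below) =====
def Claim_equal_BiconnectedGraph : Prop := ∀ (V : Int) (adj : List (List Int)), Dom_BiconnectedGraph V adj → Pre_BiconnectedGraph V adj → Spec_BiconnectedGraph V adj (BiconnectedGraph V adj)

-- ===== LEMMAS AND PROOFS =====

def countNeg (xs : List Int) : Nat := xs.countP (fun d => d == -1)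

-- the closure invariant Pre_ extracts: every member row exists, is bounded, and its
-- neighbours' rows are members again
def GoodC (adj : List (List Int)) (W : Int) (C : List Nat) : Prop :=
  ∀ j ∈ C, j < adj.length ∧
    ∀ x ∈ adj.getD j [], ((-W ≤ x ∧ x < W) ∧ (-(adj.length : Int) ≤ x ∧ nIdx adj.length x ∈ C))

-- simulation statement for dfsA (pre-visit state st; B has already visited v when pushing)
def SPp (adj : List (List Int)) (C : List Nat) (n : Nat) (f : Nat) : Prop :=
  ∀ v st, GoodC adj (n : Int) C → st.disc.length = n → 0 ≤ st.time →
    -(n : Int) ≤ v → v < (n : Int) → -(adj.length : Int) ≤ v → nIdx adj.length v ∈ C →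
    stGet st.disc v = -1 → countNeg st.disc ≤ f →
    (dfsA f v adj st).disc.length = n ∧ 0 ≤ (dfsA f v adj st).time ∧
    countNeg (dfsA f v adj st).disc < countNeg st.disc ∧
    ∃ k, k + countNeg (dfsA f v adj st).disc * (maxAdjLen adj + 1) ≤ countNeg st.disc * (maxAdjLen adj + 1) ∧
      ∀ g p cp nsp rest,
        runB (k + g) adj ((v, 0, adjOf adj v) :: (p, cp, nsp) :: rest) (visitSt v st)
          = runB g adj ((p, cp, nsp) :: rest) (popEff p cp v (dfsA f v adj st))

-- simulation statement for loopA (one frame being processed atop an arbitrary stack)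
def LPp (adj : List (List Int)) (C : List Nat) (n : Nat) (f : Nat) : Prop :=
  ∀ ns u count st, GoodC adj (n : Int) C →
    (∀ x ∈ ns, ((-(n : Int) ≤ x ∧ x < (n : Int)) ∧ (-(adj.length : Int) ≤ x ∧ nIdx adj.length x ∈ C))) →
    st.disc.length = n → 0 ≤ st.time → countNeg st.disc ≤ f →
    (loopA f u adj ns count st).disc.length = n ∧ 0 ≤ (loopA f u adj ns count st).time ∧
    countNeg (loopA f u adj ns count st).disc ≤ countNeg st.disc ∧
    ∃ cF k, k + countNeg (loopA f u adj ns count st).disc * (maxAdjLen adj + 1)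
              ≤ ns.length + countNeg st.disc * (maxAdjLen adj + 1) ∧
      ∀ g rest,
        runB (k + g) adj ((u, count, ns) :: rest) st
          = runB g adj ((u, cF, ([] : List Int)) :: rest) (loopA f u adj ns count st)

lemma stSet_length (xs : List Int) (i x : Int) : (stSet xs i x).length = xs.length := by
  unfold stSet; split <;> simp

lemma nIdx_lt (len : Nat) (i : Int) (h0 : -(len : Int) ≤ i) (h1 : i < (len : Int)) :
    nIdx len i < len := by
  unfold nIdx; split <;> omega

lemma pyGet?_nIdx {α : Type} (xs : List α) (i : Int) (h0 : -(xs.length : Int) ≤ i)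
    (h1 : i < (xs.length : Int)) (hlt : nIdx xs.length i < xs.length) :
    PySem.List.pyGet? xs i = some xs[nIdx xs.length i] := by
  by_cases hi : 0 ≤ i
  · have hni : nIdx xs.length i = i.toNat := by unfold nIdx; rw [if_neg (by omega)]
    rw [PySem.List.pyGet?_eq_some_getElem xs hi h1]
    simp only [hni]
  · have hk0 : 0 < (-i).toNat := by omega
    have hkl : (-i).toNat ≤ xs.length := by omega
    have hi' : i = -(((-i).toNat : Nat) : Int) := by omega
    have hni : nIdx xs.length i = xs.length - (-i).toNat := by
      unfold nIdx; rw [if_pos (by omega)]; omega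
    have hgl : PySem.List.pyGet? xs i = xs[xs.length - (-i).toNat]? := by
      conv_lhs => rw [hi']
      exact PySem.List.pyGet?_neg_natCast xs (-i).toNat hk0 hkl
    rw [hgl, List.getElem?_eq_getElem (by omega : xs.length - (-i).toNat < xs.length)]
    simp only [hni]

lemma stGet_eq_getElem (xs : List Int) (i : Int) (h0 : -(xs.length : Int) ≤ i)
    (h1 : i < xs.length) (hlt : nIdx xs.length i < xs.length) : stGet xs i = xs[nIdx xs.length i] := by
  unfold stGet
  rw [pyGet?_nIdx xs i h0 h1 hlt]
  rfl

lemma stSet_eq_set (xs : List Int) (i x : Int)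
    (_h1 : i < xs.length) : stSet xs i x = xs.set (nIdx xs.length i) x := by
  unfold stSet nIdx
  by_cases hi : 0 ≤ i
  · rw [if_pos hi, if_neg (by omega)]
  · rw [if_neg hi, if_pos (by omega)]

lemma countP_set (p : Int → Bool) : ∀ (xs : List Int) (j : Nat), j < xs.length → ∀ x : Int,
    ∀ (hj : j < xs.length),
    (xs.set j x).countP p + (if p xs[j] then 1 else 0) = xs.countP p + (if p x then 1 else 0) := by
  intro xs
  induction xs with
  | nil => intro j hj; simp at hj
  | cons a xs ih =>
    intro j hj x hj'
    cases j with
    | zero => simp [List.countP_cons]; split_ifs <;> omega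
    | succ j =>
      have hjl : j < xs.length := by simpa using hj
      have := ih j hjl x hjl
      simp only [List.set_cons_succ, List.countP_cons, List.getElem_cons_succ]
      split_ifs at this ⊢ <;> omega

lemma countNeg_stSet (xs : List Int) (v x : Int) (h0 : -(xs.length : Int) ≤ v) (h1 : v < xs.length)
    (hm : stGet xs v = -1) (hx : x ≠ -1) : countNeg (stSet xs v x) + 1 = countNeg xs := by
  have hlt : nIdx xs.length v < xs.length := nIdx_lt xs.length v h0 h1
  have hg : stGet xs v = xs[nIdx xs.length v] := stGet_eq_getElem xs v h0 h1 hlt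
  have hset : stSet xs v x = xs.set (nIdx xs.length v) x := stSet_eq_set xs v x h1
  have := countP_set (fun d => d == -1) xs (nIdx xs.length v) hlt x hlt
  unfold countNeg
  rw [hset]
  have hbeq : (xs[nIdx xs.length v] == (-1 : Int)) = true := by rw [← hg, hm]; simp
  have hxbeq : (x == (-1 : Int)) = false := by simpa using hx
  rw [hbeq, hxbeq] at this
  simpa using this

lemma countNeg_pos (xs : List Int) (v : Int) (h0 : -(xs.length : Int) ≤ v) (h1 : v < xs.length)
    (hm : stGet xs v = -1) : 1 ≤ countNeg xs := by
  have hlt : nIdx xs.length v < xs.length := nIdx_lt xs.length v h0 h1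
  have hg : stGet xs v = xs[nIdx xs.length v] := stGet_eq_getElem xs v h0 h1 hlt
  have hmem : (-1 : Int) ∈ xs := by rw [← hm, hg]; exact List.getElem_mem hlt
  have : 0 < xs.countP (fun d => d == -1) := by
    rw [List.countP_pos_iff]; exact ⟨-1, hmem, by simp⟩
  unfold countNeg; omega

lemma popEff_disc (p : Int) (cp : Nat) (v : Int) (st : PvSt) : (popEff p cp v st).disc = st.disc := by
  unfold popEff popEffNonroot popEffRoot popEffLow; split_ifs <;> rfl

lemma popEff_time (p : Int) (cp : Nat) (v : Int) (st : PvSt) : (popEff p cp v st).time = st.time := by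
  unfold popEff popEffNonroot popEffRoot popEffLow; split_ifs <;> rfl

lemma len_le_maxAdjLen : ∀ (adj : List (List Int)) (l : List Int), l ∈ adj → l.length ≤ maxAdjLen adj := by
  intro adj
  induction adj with
  | nil => intro l hl; simp at hl
  | cons a adj ih =>
    intro l hl
    rcases List.mem_cons.mp hl with h | h
    · subst h; simp [maxAdjLen]
    · have := ih l h
      simp [maxAdjLen] at this ⊢
      omega

lemma adjOf_len_le (adj : List (List Int)) (u : Int) : (adjOf adj u).length ≤ maxAdjLen adj := by
  unfold adjOf
  cases h : PySem.List.pyGet? adj u with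
  | none => simp
  | some l =>
    have := len_le_maxAdjLen adj l (PySem.List.mem_of_pyGet?_eq_some adj h)
    simpa using this

lemma adjOf_eq_getD (adj : List (List Int)) (v : Int) (h0 : -(adj.length : Int) ≤ v)
    (h1 : v < (adj.length : Int)) (hlt : nIdx adj.length v < adj.length) :
    adjOf adj v = adj.getD (nIdx adj.length v) [] := by
  unfold adjOf
  rw [pyGet?_nIdx adj v h0 h1 hlt, List.getD_eq_getElem adj [] hlt]
  rfl

-- rows of members of a GoodC set satisfy the loop hypothesis
lemma adjOf_hns (adj : List (List Int)) (W : Int) (C : List Nat) (hGood : GoodC adj W C)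
    (v : Int) (hvL : -(adj.length : Int) ≤ v) (hvC : nIdx adj.length v ∈ C) :
    ∀ x ∈ adjOf adj v, ((-W ≤ x ∧ x < W) ∧ (-(adj.length : Int) ≤ x ∧ nIdx adj.length x ∈ C)) := by
  obtain ⟨hjL, hrow⟩ := hGood _ hvC
  have hvlt : v < (adj.length : Int) := by
    by_cases h : 0 ≤ v
    · have hni : nIdx adj.length v = v.toNat := by unfold nIdx; rw [if_neg (by omega)]
      omega
    · omega
  rw [adjOf_eq_getD adj v hvL hvlt hjL]
  exact hrow

lemma runB_nil (f : Nat) (adj : List (List Int)) (st : PvSt) : runB f adj [] st = st := by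
  cases f <;> rfl

lemma clo_sound (adj : List (List Int)) (V : Int) :
    ∀ (f : Nat) (todo C Cf : List Nat),
    clo adj V f C todo = some Cf →
    (∀ j ∈ C, j ∉ todo → j < adj.length ∧
        ∀ x ∈ adj.getD j [], ((-V ≤ x ∧ x < V) ∧ (-(adj.length : Int) ≤ x ∧ nIdx adj.length x ∈ C))) →
    todo ⊆ C →
    C ⊆ Cf ∧ GoodC adj V Cf := by
  intro f
  induction f with
  | zero =>
    intro todo C Cf hsome hinv _
    cases todo with
    | nil =>
      rw [clo] at hsome
      cases hsome
      exact ⟨fun _ h => h, fun j hj => hinv j hj (by simp)⟩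
    | cons j rest => rw [clo] at hsome; cases hsome
  | succ f ih =>
    intro todo C Cf hsome hinv hsub
    cases todo with
    | nil =>
      rw [clo] at hsome
      cases hsome
      exact ⟨fun _ h => h, fun j hj => hinv j hj (by simp)⟩
    | cons j rest =>
      rw [clo] at hsome
      by_cases hcond : j < adj.length ∧ ∀ x ∈ adj.getD j [], (-V ≤ x ∧ x < V) ∧ -(adj.length : Int) ≤ x
      swap
      · rw [if_neg hcond] at hsome; cases hsome
      rw [if_pos hcond] at hsome
      · set new := (((adj.getD j []).map (fun x => nIdx adj.length x)).dedup).filter (fun k => decide (k ∉ C)) with hnew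
        have hrec := ih (rest ++ new) (C ++ new) Cf hsome ?_ ?_
        · exact ⟨fun a ha => hrec.1 (List.mem_append_left _ ha), hrec.2⟩
        · -- invariant for the extended sets
          intro k hk hknot
          rcases List.mem_append.mp hk with hkC | hknew
          · by_cases hkt : k ∈ j :: rest
            · have hkj : k = j := by
                rcases List.mem_cons.mp hkt with h | h
                · exact h
                · exact absurd (List.mem_append_left _ h) hknot
              subst hkj
              refine ⟨hcond.1, ?_⟩
              intro x hx
              have hb := hcond.2 x hx
              refine ⟨⟨hb.1.1, hb.1.2⟩, hb.2, ?_⟩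
              by_cases hin : nIdx adj.length x ∈ C
              · exact List.mem_append_left _ hin
              · refine List.mem_append_right _ ?_
                rw [hnew]
                refine List.mem_filter.mpr ⟨List.mem_dedup.mpr (List.mem_map.mpr ⟨x, hx, rfl⟩), by simpa using hin⟩
            · have hold := hinv k hkC hkt
              refine ⟨hold.1, ?_⟩
              intro x hx
              have hb := hold.2 x hx
              exact ⟨hb.1, hb.2.1, List.mem_append_left _ hb.2.2⟩
          · exact absurd (List.mem_append_right _ hknew) hknot
        · -- new todo still inside the new set
          intro a ha
          rcases List.mem_append.mp ha with h | h
          · exact List.mem_append_left _ (hsub (List.mem_cons_of_mem _ h))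
          · exact List.mem_append_right _ h

lemma SPp_zero (adj : List (List Int)) (C : List Nat) (n : Nat) : SPp adj C n 0 := by
  intro v st _ hlen _ h0 h1 _ _ hm hc
  have := countNeg_pos st.disc v (by omega) (by omega) hm
  omega

lemma LPp_of_SPp (adj : List (List Int)) (C : List Nat) (n : Nat) (f : Nat)
    (hS : SPp adj C n f) : LPp adj C n f := by
  intro ns
  induction ns with
  | nil =>
    intro u count st hG hns hlen ht hc
    refine ⟨by simp [loopA]; exact hlen, by simp [loopA]; exact ht, by simp [loopA], count, 0, by simp [loopA], ?_⟩
    intro g rest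
    simp [loopA]
  | cons v ns' ih =>
    intro u count st hG hns hlen ht hc
    have hv := hns v (by simp)
    by_cases hdisc : stGet st.disc v = -1
    · -- push case
      have hA : loopA f u adj (v :: ns') count st
          = loopA f u adj ns' (count + 1) (popEff u (count + 1) v (dfsA f v adj { st with par := stSet st.par v u })) := by
        rw [loopA]; simp [hdisc]
      set st1 : PvSt := { st with par := stSet st.par v u } with hst1
      have hcn1 : countNeg st1.disc = countNeg st.disc := rfl
      have hS1 := hS v st1 hG (by simpa [hst1] using hlen) (by simpa [hst1] using ht)
        hv.1.1 hv.1.2 hv.2.1 hv.2.2 (by simpa [hst1] using hdisc) (by omega)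
      obtain ⟨hlen1, ht1, hdec1, k1, hk1, heq1⟩ := hS1
      set out1 := dfsA f v adj st1 with hout1
      set st2 := popEff u (count + 1) v out1 with hst2
      have hd2 : st2.disc = out1.disc := popEff_disc _ _ _ _
      have hlen2 : st2.disc.length = n := by rw [hd2]; exact hlen1
      have ht2 : 0 ≤ st2.time := by rw [hst2, popEff_time]; exact ht1
      have hcn2 : countNeg st2.disc = countNeg out1.disc := by rw [hd2]
      have hih := ih u (count + 1) st2 hG (fun x hx => hns x (by simp [hx])) hlen2 ht2
        (by omega)
      obtain ⟨hlen3, ht3, hdec3, cF, k2, hk2, heq2⟩ := hih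
      have hm1 : countNeg st1.disc * (maxAdjLen adj + 1) = countNeg st.disc * (maxAdjLen adj + 1) := by rw [hcn1]
      have hm2 : countNeg st2.disc * (maxAdjLen adj + 1) = countNeg out1.disc * (maxAdjLen adj + 1) := by rw [hcn2]
      refine ⟨by rw [hA]; exact hlen3, by rw [hA]; exact ht3, by rw [hA]; omega, cF, 1 + k1 + k2, ?_, ?_⟩
      · rw [hA]
        simp only [List.length_cons]
        omega
      · intro g rest
        rw [hA]
        have step : runB (1 + k1 + k2 + g) adj ((u, count, v :: ns') :: rest) st
            = runB (k1 + (k2 + g)) adj ((v, 0, adjOf adj v) :: (u, count + 1, ns') :: rest) (visitSt v st1) := by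
          have hfa : 1 + k1 + k2 + g = (k1 + (k2 + g)) + 1 := by omega
          rw [hfa, runB]
          simp [hdisc, hst1]
        rw [step, heq1 (k2 + g) u (count + 1) ns' rest, ← hst2, heq2 g rest]
    · -- no push
      by_cases hpar : stGet st.par u ≠ v
      · have hA : loopA f u adj (v :: ns') count st
            = loopA f u adj ns' count { st with low := stSet st.low u (min (stGet st.low u) (stGet st.disc v)) } := by
          rw [loopA]; simp [hdisc, hpar]
        set st1 : PvSt := { st with low := stSet st.low u (min (stGet st.low u) (stGet st.disc v)) } with hst1
        have hcn1 : countNeg st1.disc = countNeg st.disc := rfl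
        have hih := ih u count st1 hG (fun x hx => hns x (by simp [hx]))
          (by simpa [hst1] using hlen) (by simpa [hst1] using ht) (by omega)
        obtain ⟨hlen3, ht3, hdec3, cF, k2, hk2, heq2⟩ := hih
        have hm1 : countNeg st1.disc * (maxAdjLen adj + 1) = countNeg st.disc * (maxAdjLen adj + 1) := by rw [hcn1]
        refine ⟨by rw [hA]; exact hlen3, by rw [hA]; exact ht3, by rw [hA]; omega, cF, 1 + k2, ?_, ?_⟩
        · rw [hA]; simp only [List.length_cons]; omega
        · intro g rest
          rw [hA]
          have step : runB (1 + k2 + g) adj ((u, count, v :: ns') :: rest) st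
              = runB (k2 + g) adj ((u, count, ns') :: rest) st1 := by
            have hfa : 1 + k2 + g = (k2 + g) + 1 := by omega
            rw [hfa, runB]
            simp [hdisc, hpar, hst1]
          rw [step, heq2 g rest]
      · have hA : loopA f u adj (v :: ns') count st = loopA f u adj ns' count st := by
          rw [loopA]; simp [hdisc, hpar]
        have hih := ih u count st hG (fun x hx => hns x (by simp [hx])) hlen ht hc
        obtain ⟨hlen3, ht3, hdec3, cF, k2, hk2, heq2⟩ := hih
        refine ⟨by rw [hA]; exact hlen3, by rw [hA]; exact ht3, by rw [hA]; omega, cF, 1 + k2, ?_, ?_⟩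
        · rw [hA]; simp only [List.length_cons]; omega
        · intro g rest
          rw [hA]
          have step : runB (1 + k2 + g) adj ((u, count, v :: ns') :: rest) st
              = runB (k2 + g) adj ((u, count, ns') :: rest) st := by
            have hfa : 1 + k2 + g = (k2 + g) + 1 := by omega
            rw [hfa, runB]
            simp [hdisc, hpar]
          rw [step, heq2 g rest]

lemma SPp_succ (adj : List (List Int)) (C : List Nat) (n : Nat) (f : Nat)
    (hL : LPp adj C n f) : SPp adj C n (f + 1) := by
  intro v st hG hlen ht h0 h1 hvL hvC hm hc
  have hA : dfsA (f + 1) v adj st = loopA f v adj (adjOf adj v) 0 (visitSt v st) := by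
    rw [dfsA]
  set stv := visitSt v st with hstv
  have hlenv : stv.disc.length = n := by
    rw [hstv]; show (stSet st.disc v st.time).length = n; rw [stSet_length]; exact hlen
  have hcv : countNeg stv.disc + 1 = countNeg st.disc := by
    rw [hstv]
    show countNeg (stSet st.disc v st.time) + 1 = countNeg st.disc
    exact countNeg_stSet st.disc v st.time (by omega) (by omega) hm (by omega)
  have htv : 0 ≤ stv.time := by rw [hstv]; show 0 ≤ st.time + 1; omega
  have hns : ∀ x ∈ adjOf adj v, ((-(n : Int) ≤ x ∧ x < (n : Int)) ∧ (-(adj.length : Int) ≤ x ∧ nIdx adj.length x ∈ C)) :=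
    adjOf_hns adj (n : Int) C hG v hvL hvC
  have hLa := hL (adjOf adj v) v 0 stv hG hns hlenv htv (by omega)
  obtain ⟨hlen3, ht3, hdec3, cF, k, hk, heq⟩ := hLa
  rw [← hA] at hlen3 ht3 hdec3 hk heq
  have hlenle : (adjOf adj v).length ≤ maxAdjLen adj := adjOf_len_le adj v
  have hmul : countNeg st.disc * (maxAdjLen adj + 1) = countNeg stv.disc * (maxAdjLen adj + 1) + (maxAdjLen adj + 1) := by
    rw [← hcv]; ring
  refine ⟨hlen3, ht3, by omega, k + 1, by omega, ?_⟩
  intro g p cp nsp rest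
  have h1' : k + 1 + g = k + (1 + g) := by omega
  rw [h1', heq (1 + g) ((p, cp, nsp) :: rest)]
  have h2' : 1 + g = g + 1 := by omega
  rw [h2', runB]

lemma SPp_all (adj : List (List Int)) (C : List Nat) (n : Nat) : ∀ f, SPp adj C n f := by
  intro f
  induction f with
  | zero => exact SPp_zero adj C n
  | succ f ih => exact SPp_succ adj C n f (LPp_of_SPp adj C n f ih)

lemma LPp_all (adj : List (List Int)) (C : List Nat) (n : Nat) (f : Nat) : LPp adj C n f :=
  LPp_of_SPp adj C n f (SPp_all adj C n f)

lemma countNeg_replicate (n : Nat) : countNeg (List.replicate n (-1)) = n := by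
  unfold countNeg
  induction n with
  | zero => rfl
  | succ n ih => simp [List.replicate] at *; omega

lemma final_bool_eq (st : PvSt) :
    (if st.disc.any (fun d => d == -1) then false
     else if st.ap.any (fun b => b) then false else true)
      = decide ((-1) ∉ st.disc ∧ true ∉ st.ap) := by
  by_cases h1 : (-1 : Int) ∈ st.disc
  · have : st.disc.any (fun d => d == -1) = true := by
      rw [List.any_eq_true]; exact ⟨-1, h1, by simp⟩
    simp [this, h1]
  · have hx : st.disc.any (fun d => d == -1) = false := by
      rw [List.any_eq_false]
      intro x hx
      simp only [beq_iff_eq]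
      intro hx1; exact h1 (hx1 ▸ hx)
    by_cases h2 : true ∈ st.ap
    · have : st.ap.any (fun b => b) = true := by
        rw [List.any_eq_true]; exact ⟨true, h2, rfl⟩
      simp [hx, this, h2]
    · have hy : st.ap.any (fun b => b) = false := by
        rw [List.any_eq_false]
        intro b hb
        cases b
        · simp
        · exact absurd hb h2
      simp [hx, hy, h1, h2]

-- ===== VERDICT (by name: the statement is the Claim_ definition above) =====
theorem BiconnectedGraph_spec : Claim_equal_BiconnectedGraph := by
  intro V adj _ hpre
  obtain ⟨hV, hclo⟩ := hpre
  obtain ⟨Cf, hCf⟩ := Option.isSome_iff_exists.mp hclo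
  have hsound := clo_sound adj V (adj.length + 2) [0] [0] Cf hCf
    (by intro j hj hnj; simp at hj; subst hj; simp at hnj)
    (fun a ha => ha)
  have h0C : (0 : Nat) ∈ Cf := hsound.1 (by simp)
  have hGoodV : GoodC adj V Cf := hsound.2
  unfold Spec_BiconnectedGraph BiconnectedGraph BiconnectedGraph_alt
  dsimp only
  set n := V.toNat with hn
  have hnV : (n : Int) = V := by omega
  have hn1 : 1 ≤ n := by omega
  have hG : GoodC adj (n : Int) Cf := by rw [hnV]; exact hGoodV
  have h0idx : nIdx adj.length 0 = 0 := by unfold nIdx; rw [if_neg (by omega)]; rfl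
  set st0 : PvSt := ⟨0, List.replicate n (-1), List.replicate n (-1), List.replicate n (-1), List.replicate n false⟩ with hst0
  set st1 := visitSt 0 st0 with hst1
  have hA : dfsA (n + 1) 0 adj st0 = loopA n 0 adj (adjOf adj 0) 0 st1 := by
    rw [dfsA, hst1]
  have hlen0 : st0.disc.length = n := by simp [hst0]
  have hc0 : countNeg st0.disc = n := by
    show countNeg (List.replicate n (-1)) = n
    exact countNeg_replicate n
  have hget0 : stGet st0.disc 0 = -1 := by
    have h0n : (0 : Int) < st0.disc.length := by rw [hlen0]; exact_mod_cast hn1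
    rw [stGet_eq_getElem st0.disc 0 (by omega) h0n (nIdx_lt _ 0 (by omega) h0n)]
    simp [hst0, nIdx]
  have hlen1 : st1.disc.length = n := by
    rw [hst1]; show (stSet st0.disc 0 st0.time).length = n; rw [stSet_length]; exact hlen0
  have hc1 : countNeg st1.disc + 1 = n := by
    rw [hst1]
    show countNeg (stSet st0.disc 0 st0.time) + 1 = n
    rw [countNeg_stSet st0.disc 0 st0.time (by omega) (by rw [hlen0]; exact_mod_cast hn1) hget0 (by simp [hst0])]
    exact hc0
  have ht1 : 0 ≤ st1.time := by rw [hst1]; show 0 ≤ st0.time + 1; simp [hst0]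
  have hns0 : ∀ x ∈ adjOf adj 0, ((-(n : Int) ≤ x ∧ x < (n : Int)) ∧ (-(adj.length : Int) ≤ x ∧ nIdx adj.length x ∈ Cf)) :=
    adjOf_hns adj (n : Int) Cf hG 0 (by omega) (by rw [h0idx]; exact h0C)
  have hL := LPp_all adj Cf n n (adjOf adj 0) 0 0 st1 hG hns0 hlen1 ht1 (by omega)
  obtain ⟨hlen3, ht3, hdec3, cF, k, hk, heq⟩ := hL
  set out := loopA n 0 adj (adjOf adj 0) 0 st1 with hout
  set M := maxAdjLen adj + 1 with hM
  have hlenle : (adjOf adj 0).length ≤ maxAdjLen adj := adjOf_len_le adj 0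
  have hmul : n * M = countNeg st1.disc * M + M := by
    rw [← hc1]; ring
  have hkF : k + 2 ≤ n * M + 1 := by rw [hmul]; omega
  have hsplit : n * M + 1 = k + (n * M + 1 - k) := by omega
  have hg2 : 2 ≤ n * M + 1 - k := by omega
  have hrun : runB (n * M + 1) adj [(0, 0, adjOf adj 0)] st1 = out := by
    rw [hsplit, heq (n * M + 1 - k) []]
    obtain ⟨g', hg'⟩ : ∃ g', n * M + 1 - k = g' + 1 := ⟨n * M - k, by omega⟩
    rw [hg', runB, runB_nil]
  rw [hrun, hA]
  exact final_bool_eq out
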